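-- pv_equiv track=rewrite | github.com/milith0kun/RepicacionBio | ovo/ovo/core/utils/residue_selection.py | from_residues_to_segments
-- ===== SOURCE A (Python) =====
-- def from_residues_to_segments(
--     chain_id: str, residues: list[int], start_res: int | None = None, end_res: int | None = None
-- ) -> list[str]:
--     """Convert a list of residues [3,4,5,6,9,10,...] into a list of segments [3-6,9-10,...].
--
--     Args:
--         chain_id (str): Required. The chain ID.
--         residues (list[int]): Required. A list of residues.
--         start_res (int, optional): The start residue. If specified, trims residues from start_res. Defaults to None.
--         end_res (int, optional): The end residue. If specified, trims residues to end_res. Defaults to None.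
--
--     Returns:
--         list(str): A list of segments, i.e. [3-6,9-10,...]
--     """
--
--     if not residues:
--         return []
--
--     if start_res is not None:
--         residues = [res for res in residues if res >= start_res]
--     if end_res is not None:
--         residues = [res for res in residues if res <= end_res]
--
--     segments = []
--     start = end = residues[0]
--     for i in range(1, len(residues)):
--         if residues[i] == residues[i - 1] + 1:
--             end = residues[i]
--         else:
--             segments.append(f"{chain_id}{start}-{end}")
--             start = end = residues[i]
--     segments.append(f"{chain_id}{start}-{end}")
--     return segments
-- ===== SOURCE B (Python) =====
-- def from_residues_to_segments(
--     chain_id: str, residues: list[int], start_res: int | None = None, end_res: int | None = None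
-- ) -> list[str]:
--     if start_res is not None:
--         residues = [res for res in residues if res >= start_res]
--     if end_res is not None:
--         residues = [res for res in residues if res <= end_res]
--     # boundary detection via shifted zips: no scan state at all
--     starts = [b for a, b in zip([None] + residues, residues) if a is None or b != a + 1]
--     ends = [a for a, b in zip(residues, residues[1:] + [None]) if b is None or b != a + 1]
--     return [f"{chain_id}{s}-{e}" for s, e in zip(starts, ends)]
-- ===== Notes on version B (the rewrite author's own statement) =====
-- stated objective: alternative
-- what changed: B replaces A's stateful scan (start/end accumulators mutated across a range loop) by stateless boundary detection: it zips the filtered residues with shifted copies of themselves to collect the run-start values and the run-end values as two comprehensions, then zips those two lists into the segment strings; B also drops the up-front empty guard, so it returns [] instead of raising where the filters empty a nonempty list.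
-- crash fix: On a nonempty residues list whose elements are all removed by the start_res/end_res filters, A raises IndexError (residues[0] on the emptied list) while B returns []. — e.g. on from_residues_to_segments("A", [5], some 6, none): A raises IndexError, B returns []
import Mathlib
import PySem

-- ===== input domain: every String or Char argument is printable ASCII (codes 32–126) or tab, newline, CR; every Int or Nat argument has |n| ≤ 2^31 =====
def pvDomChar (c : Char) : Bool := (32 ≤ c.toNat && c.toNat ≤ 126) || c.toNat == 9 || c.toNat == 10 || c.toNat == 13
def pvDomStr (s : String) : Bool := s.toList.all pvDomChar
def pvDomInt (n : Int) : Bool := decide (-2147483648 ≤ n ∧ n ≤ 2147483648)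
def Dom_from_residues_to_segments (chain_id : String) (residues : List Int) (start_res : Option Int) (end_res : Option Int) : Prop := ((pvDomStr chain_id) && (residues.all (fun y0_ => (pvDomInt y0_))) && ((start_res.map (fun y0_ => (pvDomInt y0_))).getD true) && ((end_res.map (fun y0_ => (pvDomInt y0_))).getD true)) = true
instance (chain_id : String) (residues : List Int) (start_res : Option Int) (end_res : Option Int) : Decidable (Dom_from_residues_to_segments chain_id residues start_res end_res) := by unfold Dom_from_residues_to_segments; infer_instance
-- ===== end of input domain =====

-- B detects run boundaries by zipping the filtered residues with shifted copies of themselves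
-- (two stateless comprehensions collecting run-start and run-end values, zipped into strings),
-- instead of A's stateful scan with start/end accumulators (objective: alternative; return
-- values proved equal on Pre_).

-- ===== PORT A =====
-- the f-string f"{chain_id}{x}-{y}" (both sources format segments with this exact expression)
def pvFmt (chain_id : String) (x y : Int) : String :=
  chain_id ++ PySem.Int.toStr x ++ "-" ++ PySem.Int.toStr y

-- one iteration of A's `for i in range(1, len(residues))` loop; state = (segments, start, end)
def pvAStep (chain_id : String) (xs : List Int) (st : List String × Int × Int) (i : Int) :
    List String × Int × Int :=
  if PySem.List.pyGetD xs i 0 = PySem.List.pyGetD xs (i - 1) 0 + 1 then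
    (st.1, st.2.1, PySem.List.pyGetD xs i 0)
  else
    (st.1 ++ [pvFmt chain_id st.2.1 st.2.2], PySem.List.pyGetD xs i 0, PySem.List.pyGetD xs i 0)

def from_residues_to_segments (chain_id : String) (residues : List Int) (start_res : Option Int) (end_res : Option Int) : List String :=
  if residues = [] then []
  else
    let r1 := match start_res with
      | some s => residues.filter (fun res => decide (s ≤ res))
      | none => residues
    let r2 := match end_res with
      | some e => r1.filter (fun res => decide (res ≤ e))
      | none => r1
    match r2 with
    | [] => []  -- Python raises IndexError on `residues[0]` here; excluded by Pre_
    | r0 :: _ =>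
      let st := (PySem.List.pyRange 1 (r2.length : Int) 1).foldl (pvAStep chain_id r2) ([], r0, r0)
      st.1 ++ [pvFmt chain_id st.2.1 st.2.2]

-- ===== PORT B =====
-- starts = [b for a, b in zip([None] + residues, residues) if a is None or b != a + 1]
def pvStarts (xs : List Int) : List Int :=
  ((((none : Option Int) :: xs.map some).zip xs).filter
    (fun p => match p.1 with | none => true | some a => decide (p.2 ≠ a + 1))).map Prod.snd

-- ends = [a for a, b in zip(residues, residues[1:] + [None]) if b is None or b != a + 1]
def pvEnds (xs : List Int) : List Int :=
  ((xs.zip (xs.tail.map some ++ [(none : Option Int)])).filter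
    (fun p => match p.2 with | none => true | some b => decide (b ≠ p.1 + 1))).map Prod.fst

def from_residues_to_segments_alt (chain_id : String) (residues : List Int) (start_res : Option Int) (end_res : Option Int) : List String :=
  let r1 := match start_res with
    | some s => residues.filter (fun res => decide (s ≤ res))
    | none => residues
  let r2 := match end_res with
    | some e => r1.filter (fun res => decide (res ≤ e))
    | none => r1
  ((pvStarts r2).zip (pvEnds r2)).map (fun p => pvFmt chain_id p.1 p.2)

-- ===== PRECONDITION & SPEC =====
-- does a residue survive both optional filters?
def pvKeep (start_res end_res : Option Int) (res : Int) : Bool :=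
  (match start_res with | some s => decide (s ≤ res) | none => true) &&
  (match end_res with | some e => decide (res ≤ e) | none => true)

-- Pre_ excludes exactly the inputs where A raises IndexError: a nonempty residue list whose
-- elements are all removed by the start_res/end_res filters (A then indexes the empty list).
def Pre_from_residues_to_segments (chain_id : String) (residues : List Int) (start_res : Option Int) (end_res : Option Int) : Prop :=
  residues = [] ∨ residues.any (pvKeep start_res end_res) = true
instance (chain_id : String) (residues : List Int) (start_res : Option Int) (end_res : Option Int) : Decidable (Pre_from_residues_to_segments chain_id residues start_res end_res) := by unfold Pre_from_residues_to_segments; infer_instance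

def pvWitness_from_residues_to_segments : String × List Int × Option Int × Option Int :=
  ("A", [3, 4, 5, 9, 10], some 4, some 9)

-- On a nonempty residues list whose elements are all filtered out, A raises IndexError
-- (residues[0] on the emptied list) while B returns [].
def Raises_from_residues_to_segments (chain_id : String) (residues : List Int) (start_res : Option Int) (end_res : Option Int) : Prop :=
  residues ≠ [] ∧ residues.any (pvKeep start_res end_res) = false
instance (chain_id : String) (residues : List Int) (start_res : Option Int) (end_res : Option Int) : Decidable (Raises_from_residues_to_segments chain_id residues start_res end_res) := by unfold Raises_from_residues_to_segments; infer_instance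

def pvRaiseWitness_from_residues_to_segments : String × List Int × Option Int × Option Int :=
  ("A", [5], some 6, none)
def pvRaiseWitnessOut_from_residues_to_segments : List String := []

def Spec_from_residues_to_segments (chain_id : String) (residues : List Int) (start_res : Option Int) (end_res : Option Int) (out : List String) : Prop := out = from_residues_to_segments_alt chain_id residues start_res end_res
instance (chain_id : String) (residues : List Int) (start_res : Option Int) (end_res : Option Int) (out : List String) : Decidable (Spec_from_residues_to_segments chain_id residues start_res end_res out) := by unfold Spec_from_residues_to_segments; infer_instance

-- ===== CLAIM (what is proved, stated in full; the proofs are below) =====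
def Claim_equal_from_residues_to_segments : Prop := ∀ (chain_id : String) (residues : List Int) (start_res : Option Int) (end_res : Option Int), Dom_from_residues_to_segments chain_id residues start_res end_res → Pre_from_residues_to_segments chain_id residues start_res end_res → Spec_from_residues_to_segments chain_id residues start_res end_res (from_residues_to_segments chain_id residues start_res end_res)

def Claim_raises_from_residues_to_segments : Prop := (∀ (chain_id : String) (residues : List Int) (start_res : Option Int) (end_res : Option Int), Dom_from_residues_to_segments chain_id residues start_res end_res → Raises_from_residues_to_segments chain_id residues start_res end_res → ¬ Pre_from_residues_to_segments chain_id residues start_res end_res) ∧ (Dom_from_residues_to_segments (pvRaiseWitness_from_residues_to_segments.1) (pvRaiseWitness_from_residues_to_segments.2.1) (pvRaiseWitness_from_residues_to_segments.2.2.1) (pvRaiseWitness_from_residues_to_segments.2.2.2) ∧ Raises_from_residues_to_segments (pvRaiseWitness_from_residues_to_segments.1) (pvRaiseWitness_from_residues_to_segments.2.1) (pvRaiseWitness_from_residues_to_segments.2.2.1) (pvRaiseWitness_from_residues_to_segments.2.2.2) ∧ from_residues_to_segments_alt (pvRaiseWitness_from_residues_to_segments.1) (pvRaiseWitness_from_residues_to_segments.2.1)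 (pvRaiseWitness_from_residues_to_segments.2.2.1) (pvRaiseWitness_from_residues_to_segments.2.2.2) = pvRaiseWitnessOut_from_residues_to_segments)

-- ===== LEMMAS AND PROOFS =====

-- A's loop, rewritten as a fold over the tail elements (the comparison value residues[i-1]
-- always equals the `end` component of the state).
def pvMidStep (chain_id : String) (st : List String × Int × Int) (r : Int) :
    List String × Int × Int :=
  if r = st.2.2 + 1 then (st.1, st.2.1, r)
  else (st.1 ++ [pvFmt chain_id st.2.1 st.2.2], r, r)

-- reference decomposition into maximal consecutive runs, as (start, end) pairs
def pvRuns (s e : Int) : List Int → List (Int × Int)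
  | [] => [(s, e)]
  | r :: t => if r = e + 1 then pvRuns s r t else (s, e) :: pvRuns r r t

-- the run-start values contributed after a pending previous element a
def pvS (a : Int) : List Int → List Int
  | [] => []
  | b :: t => if b = a + 1 then pvS b t else b :: pvS b t

-- the run-end values of a run currently ending at a
def pvE (a : Int) : List Int → List Int
  | [] => [a]
  | b :: t => if b = a + 1 then pvE b t else a :: pvE b t

lemma pvA_idx (chain_id : String) (xs : List Int) :
    ∀ (k : Nat), k < xs.length → ∀ (segs : List String) (start : Int),
      (PySem.List.pyRange ((k : Int) + 1) (xs.length : Int) 1).foldl (pvAStep chain_id xs)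
          (segs, start, xs.getD k 0)
        = (xs.drop (k + 1)).foldl (pvMidStep chain_id) (segs, start, xs.getD k 0) := by
  intro k hk
  induction hn : xs.length - (k + 1) generalizing k with
  | zero =>
    intro segs start
    have h1 : (xs.length : Int) ≤ (k : Int) + 1 := by omega
    rw [PySem.List.pyRange_one_eq_nil h1, List.drop_eq_nil_of_le (by omega)]
    rfl
  | succ n ihn =>
    intro segs start
    have hk1 : k + 1 < xs.length := by omega
    have hcons : PySem.List.pyRange ((k : Int) + 1) (xs.length : Int) 1
        = ((k : Int) + 1) :: PySem.List.pyRange ((k : Int) + 1 + 1) (xs.length : Int) 1 :=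
      PySem.List.pyRange_one_cons (by omega)
    have hdrop : xs.drop (k + 1) = xs.getD (k + 1) 0 :: xs.drop (k + 2) := by
      rw [List.drop_eq_getElem_cons hk1, List.getD_eq_getElem _ _ hk1]
    have hgi : PySem.List.pyGetD xs ((k : Int) + 1) 0 = xs.getD (k + 1) 0 := by
      rw [show ((k : Int) + 1) = ((k + 1 : Nat) : Int) by push_cast; ring,
        PySem.List.pyGetD_natCast]
    have hgi1 : PySem.List.pyGetD xs ((k : Int) + 1 - 1) 0 = xs.getD k 0 := by
      rw [show ((k : Int) + 1 - 1) = ((k : Nat) : Int) by ring, PySem.List.pyGetD_natCast]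
    rw [hcons, hdrop, List.foldl_cons, List.foldl_cons]
    have hstep : pvAStep chain_id xs (segs, start, xs.getD k 0) ((k : Int) + 1)
        = pvMidStep chain_id (segs, start, xs.getD k 0) (xs.getD (k + 1) 0) := by
      rw [pvAStep, pvMidStep, hgi, hgi1]
    rw [hstep]
    have := ihn (k + 1) hk1 (by omega)
    rw [show ((k + 1 : Nat) : Int) + 1 = (k : Int) + 1 + 1 by push_cast; ring] at this
    rcases hm : pvMidStep chain_id (segs, start, xs.getD k 0) (xs.getD (k + 1) 0)
      with ⟨s', st', e'⟩
    have hthird : ∀ (st : List String × Int × Int) (r : Int),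
        (pvMidStep chain_id st r).2.2 = r := by
      intro st r; rw [pvMidStep]; split <;> rfl
    have he' : xs.getD (k + 1) 0 = e' := by
      rw [← hthird (segs, start, xs.getD k 0) (xs.getD (k + 1) 0), hm]
    rw [← he']
    exact this s' st'

-- A's tail fold computes exactly the formatted run list
lemma pvFold_runs (c : String) :
    ∀ (l : List Int) (segs : List String) (s e : Int),
      (l.foldl (pvMidStep c) (segs, s, e)).1
        ++ [pvFmt c (l.foldl (pvMidStep c) (segs, s, e)).2.1
                    (l.foldl (pvMidStep c) (segs, s, e)).2.2]
      = segs ++ (pvRuns s e l).map (fun p => pvFmt c p.1 p.2) := by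
  intro l
  induction l with
  | nil => intro segs s e; simp [pvRuns]
  | cons r t ih =>
    intro segs s e
    rw [List.foldl_cons, pvMidStep, pvRuns]
    by_cases h : r = e + 1
    · rw [if_pos h, if_pos h]; exact ih segs s r
    · rw [if_neg h, if_neg h]
      rw [ih (segs ++ [pvFmt c s e]) r r]
      simp

-- B's starts comprehension on a nonempty list
lemma pvStarts_aux (t : List Int) : ∀ (a : Int),
    ((((a :: t).map some).zip t).filter
      (fun p => match p.1 with | none => true | some x => decide (p.2 ≠ x + 1))).map Prod.snd
    = pvS a t := by
  induction t with
  | nil => intro a; rfl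
  | cons b t2 ih =>
    intro a
    show (((some a, b) :: (((b :: t2).map some).zip t2)).filter _).map Prod.snd = pvS a (b :: t2)
    rw [List.filter_cons, pvS]
    by_cases h : b = a + 1
    · rw [if_neg (by simp [h]), if_pos h]
      exact ih b
    · rw [if_pos (by simpa using h), if_neg h, List.map_cons]
      rw [ih b]

lemma pvStarts_cons (a : Int) (t : List Int) : pvStarts (a :: t) = a :: pvS a t := by
  rw [pvStarts]
  show (((none, a) :: (((a :: t).map some).zip t)).filter _).map Prod.snd = _
  rw [List.filter_cons, if_pos rfl, List.map_cons, pvStarts_aux t a]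

lemma pvEnds_cons (a : Int) (t : List Int) : pvEnds (a :: t) = pvE a t := by
  induction t generalizing a with
  | nil => rfl
  | cons b t2 ih =>
    rw [pvEnds]
    show (((a, some b) :: ((b :: t2).zip ((t2.map some) ++ [none]))).filter _).map Prod.fst
        = pvE a (b :: t2)
    rw [List.filter_cons, pvE]
    by_cases h : b = a + 1
    · rw [if_neg (by simp [h]), if_pos h, ← ih b]; rfl
    · rw [if_pos (by simpa using h), if_neg h, List.map_cons, ← ih b]; rfl

-- zipping the boundary value lists yields the run pairs
lemma pvZip_runs : ∀ (t : List Int) (s e : Int),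
    (s :: pvS e t).zip (pvE e t) = pvRuns s e t := by
  intro t
  induction t with
  | nil => intro s e; rfl
  | cons r t2 ih =>
    intro s e
    rw [pvS, pvE, pvRuns]
    by_cases h : r = e + 1
    · rw [if_pos h, if_pos h, if_pos h]; exact ih s r
    · rw [if_neg h, if_neg h, if_neg h, List.zip_cons_cons, ih r r]

-- the segment construction on the (nonempty) filtered list: A's scan = B's boundary zip
lemma pvCore (c : String) (r0 : Int) (rest : List Int) :
    (let st := (PySem.List.pyRange 1 (((r0 :: rest).length : Nat) : Int) 1).foldl
        (pvAStep c (r0 :: rest)) ([], r0, r0)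
     st.1 ++ [pvFmt c st.2.1 st.2.2])
    = ((pvStarts (r0 :: rest)).zip (pvEnds (r0 :: rest))).map (fun p => pvFmt c p.1 p.2) := by
  have hA := pvA_idx c (r0 :: rest) 0 (by simp) [] r0
  rw [show (((0 : Nat) : Int) + 1) = 1 by norm_num] at hA
  simp only [List.getD, List.getElem?_cons_zero, Option.getD_some, List.drop_succ_cons,
    List.drop_zero] at hA
  rw [pvStarts_cons, pvEnds_cons, pvZip_runs]
  dsimp only
  rw [hA, pvFold_runs c rest [] r0 r0]
  simp

-- ===== VERDICT (by name: the statement is the Claim_ definition above) =====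
theorem from_residues_to_segments_spec : Claim_equal_from_residues_to_segments := by
  intro c residues sr er _ hpre
  unfold Spec_from_residues_to_segments
  by_cases hres : residues = []
  · subst hres
    cases sr <;> cases er <;>
      simp [from_residues_to_segments, from_residues_to_segments_alt, pvStarts, pvEnds]
  · have hany : residues.any (pvKeep sr er) = true := by
      rcases hpre with h | h
      · exact absurd h hres
      · exact h
    obtain ⟨x, hxmem, hxk⟩ := List.any_eq_true.mp hany
    rw [from_residues_to_segments.eq_def, if_neg hres, from_residues_to_segments_alt.eq_def]
    cases sr with
    | none =>
      cases er with
      | none =>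
        dsimp only
        obtain ⟨r0, rest, hE⟩ := List.exists_cons_of_ne_nil hres
        rw [hE]
        exact pvCore c r0 rest
      | some e =>
        dsimp only
        rw [pvKeep] at hxk
        have hmem : x ∈ residues.filter (fun res => decide (res ≤ e)) :=
          List.mem_filter.mpr ⟨hxmem, by simpa using hxk⟩
        obtain ⟨r0, rest, hE⟩ := List.exists_cons_of_ne_nil (List.ne_nil_of_mem hmem)
        rw [hE]
        exact pvCore c r0 rest
    | some st =>
      cases er with
      | none =>
        dsimp only
        rw [pvKeep] at hxk
        have hmem : x ∈ residues.filter (fun res => decide (st ≤ res)) :=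
          List.mem_filter.mpr ⟨hxmem, by simpa using hxk⟩
        obtain ⟨r0, rest, hE⟩ := List.exists_cons_of_ne_nil (List.ne_nil_of_mem hmem)
        rw [hE]
        exact pvCore c r0 rest
      | some e =>
        dsimp only
        rw [pvKeep] at hxk
        simp only [Bool.and_eq_true, decide_eq_true_eq] at hxk
        have hmem : x ∈ (residues.filter (fun res => decide (st ≤ res))).filter
            (fun res => decide (res ≤ e)) :=
          List.mem_filter.mpr ⟨List.mem_filter.mpr ⟨hxmem, by simpa using hxk.1⟩,
            by simpa using hxk.2⟩
        obtain ⟨r0, rest, hE⟩ := List.exists_cons_of_ne_nil (List.ne_nil_of_mem hmem)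
        rw [hE]
        exact pvCore c r0 rest

@[simp]
theorem from_residues_to_segments_raises : Claim_raises_from_residues_to_segments := by
  constructor
  · intro c residues sr er _ hr hpre
    rcases hpre with h | h
    · exact hr.1 h
    · rw [hr.2] at h; exact Bool.false_ne_true h
  · refine ⟨by decide, by decide, by decide⟩
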